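-- pv_equiv track=rewrite | github.com/praveeenyalla/new-cinenest | backend/routes/ai.py | sanitize_response
-- ===== SOURCE A (Python) =====
-- def sanitize_response(text: str) -> str:
--     """Removes any mention of AI providers for a white-labeled experience"""
--     replacements = {
--         "Google": "Core",
--         "Gemini": "Brain",
--         "Groq": "Neural Engine",
--         "llama": "Model-X",
--         "mixtral": "Model-Y",
--         "openai": "AI",
--         "ChatGPT": "Assistant"
--     }
--     for old, new in replacements.items():
--         text = text.replace(old, new)
--         text = text.replace(old.lower(), new)
--     return text
-- ===== SOURCE B (Python) =====
-- def sanitize_response(text: str) -> str: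
--     """Removes any mention of AI providers for a white-labeled experience"""
--     pairs = [
--         ("Google", "Core"), ("google", "Core"),
--         ("Gemini", "Brain"), ("gemini", "Brain"),
--         ("Groq", "Neural Engine"), ("groq", "Neural Engine"),
--         ("llama", "Model-X"),
--         ("mixtral", "Model-Y"),
--         ("openai", "AI"),
--         ("ChatGPT", "Assistant"), ("chatgpt", "Assistant"),
--     ]
--     out = []
--     i = 0
--     n = len(text)
--     while i < n:
--         for old, new in pairs:
--             if text.startswith(old, i):
--                 out.append(new)
--                 i += len(old)
--                 break
--         else:
--             out.append(text[i])
--             i += 1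
--     return "".join(out)
-- ===== Notes on version B (the rewrite author's own statement) =====
-- stated objective: alternative
-- what changed: Replaces A's 14 sequential whole-string replace() passes by a single left-to-right scan that at each position tries the 11 literal provider names (no replacement text can itself be or abut a name, so one pass suffices).
-- outside the precondition, e.g. on sanitize_response('mixtrallama'): A returns 'mixtraModel-X', B returns 'Model-Ylama'
import Mathlib
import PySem

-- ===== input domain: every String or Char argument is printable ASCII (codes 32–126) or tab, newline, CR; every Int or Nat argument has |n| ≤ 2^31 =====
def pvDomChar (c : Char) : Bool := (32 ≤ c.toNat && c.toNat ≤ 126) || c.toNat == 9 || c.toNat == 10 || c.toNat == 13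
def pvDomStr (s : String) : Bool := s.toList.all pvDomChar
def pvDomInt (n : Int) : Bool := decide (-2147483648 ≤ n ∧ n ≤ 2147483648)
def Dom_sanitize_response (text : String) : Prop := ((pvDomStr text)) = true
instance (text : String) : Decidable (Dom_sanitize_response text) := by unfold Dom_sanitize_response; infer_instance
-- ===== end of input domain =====

-- B replaces A's 14 sequential whole-string replace passes by one left-to-right scan
-- over the 11 literal provider names (objective: alternative single-pass algorithm).

-- ===== PORT A =====
def sanitize_response (text : String) : String :=
  let replacements : List (String × String) :=
    [("Google", "Core"), ("Gemini", "Brain"), ("Groq", "Neural Engine"),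
     ("llama", "Model-X"), ("mixtral", "Model-Y"), ("openai", "AI"),
     ("ChatGPT", "Assistant")]
  replacements.foldl
    (fun t p =>
      PySem.Str.replace (PySem.Str.replace t p.1 p.2) (PySem.Str.lower p.1) p.2)
    text

-- ===== PORT B =====
def pvPairsB : List (List Char × List Char) :=
  [("Google".toList, "Core".toList), ("google".toList, "Core".toList),
   ("Gemini".toList, "Brain".toList), ("gemini".toList, "Brain".toList),
   ("Groq".toList, "Neural Engine".toList), ("groq".toList, "Neural Engine".toList),
   ("llama".toList, "Model-X".toList),
   ("mixtral".toList, "Model-Y".toList),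
   ("openai".toList, "AI".toList),
   ("ChatGPT".toList, "Assistant".toList), ("chatgpt".toList, "Assistant".toList)]

def pvFind (t : List Char) : Option (List Char × List Char) :=
  pvPairsB.find? (fun p => p.1.isPrefixOf t)

def pvScan : List Char → List Char
  | [] => []
  | c :: r =>
    match pvFind (c :: r) with
    | some p => p.2 ++ pvScan (List.drop (p.1.length - 1) r)
    | none => c :: pvScan r
termination_by t => t.length
decreasing_by
  all_goals simp [List.length_drop]

def sanitize_response_alt (text : String) : String :=
  String.ofList (pvScan text.toList)

-- ===== PRECONDITION & SPEC =====
-- Pre_ excludes texts containing the substring "mixtrallama", the only input on which two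
-- provider names overlap: there A's fixed pass order rewrites the later, shorter name while
-- B's left-to-right scan rewrites the earlier, longer one — both readings of that
-- overlapping-match corner are defensible.
def Pre_sanitize_response (text : String) : Prop :=
  PySem.Str.isIn "mixtrallama" text = false
instance (text : String) : Decidable (Pre_sanitize_response text) := by
  unfold Pre_sanitize_response; infer_instance

def pvWitness_sanitize_response : String := "Please ask Gemini or chatgpt"

def Spec_sanitize_response (text : String) (out : String) : Prop := out = sanitize_response_alt text
instance (text : String) (out : String) : Decidable (Spec_sanitize_response text out) := by
  unfold Spec_sanitize_response; infer_instance

-- ===== CLAIM (what is proved, stated in full; the proofs are below) =====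
def Claim_equal_sanitize_response : Prop := ∀ (text : String), Dom_sanitize_response text → Pre_sanitize_response text → Spec_sanitize_response text (sanitize_response text)

-- ===== LEMMAS AND PROOFS =====

-- naive structural form of Python's str.replace (leftmost, non-overlapping)
def pvRepl (o n : List Char) : List Char → List Char
  | [] => []
  | c :: r =>
    if o.isPrefixOf (c :: r) then n ++ pvRepl o n (List.drop (o.length - 1) r)
    else c :: pvRepl o n r
termination_by t => t.length
decreasing_by
  all_goals simp [List.length_drop]

def pvFoldP (ps : List (List Char × List Char)) (t : List Char) : List Char :=
  ps.foldl (fun s p => pvRepl p.1 p.2 s) t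

def pvPasses : List (List Char × List Char) :=
  [("Google".toList, "Core".toList), ("google".toList, "Core".toList),
   ("Gemini".toList, "Brain".toList), ("gemini".toList, "Brain".toList),
   ("Groq".toList, "Neural Engine".toList), ("groq".toList, "Neural Engine".toList),
   ("llama".toList, "Model-X".toList), ("llama".toList, "Model-X".toList),
   ("mixtral".toList, "Model-Y".toList), ("mixtral".toList, "Model-Y".toList),
   ("openai".toList, "AI".toList), ("openai".toList, "AI".toList),
   ("ChatGPT".toList, "Assistant".toList), ("chatgpt".toList, "Assistant".toList)]

def pvKeys : List (List Char) := pvPairsB.map Prod.fst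
def pvVals : List (List Char) := pvPairsB.map Prod.snd

def pvImmune (w : List Char) : Prop :=
  ∃ o ∈ pvKeys, ∃ d, 1 ≤ d ∧ d < o.length ∧ w = o.drop d

theorem pv_go_eq (o n : List Char) (ho : o ≠ []) :
    ∀ fuel l acc, l.length ≤ fuel →
      PySem.Chars.replace.go o n fuel l acc = acc.reverse ++ pvRepl o n l := by
  intro fuel
  induction fuel with
  | zero =>
    intro l acc hl
    have hln : l = [] := by cases l with | nil => rfl | cons a b => simp at hl
    subst hln
    rw [PySem.Chars.replace.go.eq_def]
    simp [pvRepl]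
  | succ f ih =>
    intro l acc hl
    cases l with
    | nil =>
      rw [PySem.Chars.replace.go.eq_def]
      simp [pvRepl]
    | cons c t =>
      obtain ⟨o0, os, rfl⟩ : ∃ o0 os, o = o0 :: os := by
        cases o with | nil => exact absurd rfl ho | cons a b => exact ⟨a, b, rfl⟩
      rw [PySem.Chars.replace.go.eq_def]
      by_cases hp : (o0 :: os).isPrefixOf (c :: t) = true
      · simp only [hp, if_true]
        rw [ih]
        · rw [pvRepl, if_pos hp]
          simp [List.append_assoc]
        · simp at hl ⊢
          omega
      · simp only [hp]
        rw [ih t (c :: acc) (by simp at hl ⊢; omega)]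
        rw [pvRepl, if_neg hp]
        simp

theorem pv_replace_eq (o n s : List Char) (ho : o ≠ []) :
    PySem.Chars.replace s o n = pvRepl o n s := by
  rw [PySem.Chars.replace]
  rw [if_neg (by simpa [List.isEmpty_iff] using ho)]
  rw [pv_go_eq o n ho s.length s [] (le_refl _)]
  simp

theorem pv_prefix_append_cases {o a x : List Char} (h : o <+: a ++ x) :
    o <+: a ∨ (a <+: o ∧ o.drop a.length <+: x) := by
  induction a generalizing o with
  | nil => exact Or.inr ⟨List.nil_prefix, by simpa using h⟩
  | cons b a' ih =>
    rcases o with _ | ⟨d, o'⟩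
    · exact Or.inl List.nil_prefix
    · rw [List.cons_append, List.cons_prefix_cons] at h
      obtain ⟨rfl, h'⟩ := h
      rcases ih h' with h1 | ⟨h2, h3⟩
      · exact Or.inl (List.cons_prefix_cons.mpr ⟨rfl, h1⟩)
      · exact Or.inr ⟨List.cons_prefix_cons.mpr ⟨rfl, h2⟩, by simpa using h3⟩

theorem pv_pp (o n : List Char) (hn : n ∈ pvVals) :
    ∀ u w, (∀ d < w.length, ∀ v ∈ pvVals,
        ((w.drop d).isPrefixOf v = false ∧ v.isPrefixOf (w.drop d) = false)) →
      w <+: pvRepl o n u → w <+: u := by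
  intro u
  induction u with
  | nil =>
    intro w _ h
    simpa [pvRepl] using h
  | cons c r ih =>
    intro w hw h
    rcases w with _ | ⟨d, w'⟩
    · exact List.nil_prefix
    rw [pvRepl] at h
    split at h
    · rcases pv_prefix_append_cases h with h1 | ⟨h2, _⟩
      · have := (hw 0 (by simp) n hn).1
        rw [List.drop_zero] at this
        exact absurd (List.isPrefixOf_iff_prefix.mpr h1) (by simp [this])
      · have := (hw 0 (by simp) n hn).2
        rw [List.drop_zero] at this
        exact absurd (List.isPrefixOf_iff_prefix.mpr h2) (by simp [this])
    · rw [List.cons_prefix_cons] at h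
      obtain ⟨rfl, h'⟩ := h
      have hw' : ∀ e < w'.length, ∀ v ∈ pvVals,
          ((w'.drop e).isPrefixOf v = false ∧ v.isPrefixOf (w'.drop e) = false) := by
        intro e he v hv
        have := hw (e + 1) (by simp; omega) v hv
        simpa using this
      exact List.cons_prefix_cons.mpr ⟨rfl, ih w' hw' h'⟩

theorem pv_F_immune : ∀ o ∈ pvKeys, ∀ e ∈ List.range o.length, 1 ≤ e →
    ∀ v ∈ pvVals, ((o.drop e).isPrefixOf v = false ∧ v.isPrefixOf (o.drop e) = false) := by
  decide

theorem pv_F_len : ∀ K ∈ pvKeys, 2 ≤ K.length := by decide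

theorem pv_F_noprefix : ∀ K ∈ pvKeys, ∀ K' ∈ pvKeys, K ≠ K' → K.isPrefixOf K' = false := by
  decide

theorem pv_F_OV : ∀ K ∈ pvKeys, ∀ o ∈ pvKeys, ∀ d ∈ List.range K.length, 1 ≤ d →
    ((K.drop d).isPrefixOf o || o.isPrefixOf (K.drop d)) = true →
    (K = "mixtral".toList ∧ o = "llama".toList ∧ d = 6) := by
  decide

theorem pv_F_val : ∀ o ∈ pvKeys, ∀ v ∈ pvVals, ∀ d ∈ List.range v.length,
    ((v.drop d).isPrefixOf o = false ∧ o.isPrefixOf (v.drop d) = false) := by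
  decide

theorem pv_pp_immune (o n : List Char) (hn : n ∈ pvVals) (u w : List Char)
    (hi : pvImmune w) (h : w <+: pvRepl o n u) : w <+: u := by
  obtain ⟨o', ho', d₀, hd1, hd2, rfl⟩ := hi
  refine pv_pp o n hn u _ ?_ h
  intro d hd v hv
  have hlen : (o'.drop d₀).length = o'.length - d₀ := List.length_drop
  have he : d₀ + d < o'.length := by omega
  have := pv_F_immune o' ho' (d₀ + d) (List.mem_range.mpr he) (by omega) v hv
  simpa [List.drop_drop] using this

theorem pv_fold_nil (ps : List (List Char × List Char)) : pvFoldP ps [] = [] := by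
  induction ps with
  | nil => rfl
  | cons p ps ih =>
    show pvFoldP ps (pvRepl p.1 p.2 []) = []
    rw [show pvRepl p.1 p.2 [] = [] from by rw [pvRepl]]
    exact ih

theorem pv_repl_append (o n : List Char) (a x : List Char)
    (h : ∀ q < a.length, ¬ o <+: (a.drop q ++ x)) :
    pvRepl o n (a ++ x) = a ++ pvRepl o n x := by
  induction a with
  | nil => simp
  | cons c a' ih =>
    have h0 : ¬ o.isPrefixOf (c :: (a' ++ x)) = true := by
      intro hc
      exact h 0 (by simp) (by simpa using List.isPrefixOf_iff_prefix.mp hc)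
    rw [List.cons_append, pvRepl, if_neg h0]
    rw [ih (by intro q hq; exact fun hc => h (q+1) (by simp; omega) (by simpa using hc))]
    simp

theorem pv_fold_cons (c : Char) (r : List Char)
    (hr : ∀ K ∈ pvKeys, ¬ K <+: (c :: r)) :
    ∀ ps, (∀ p ∈ ps, p.1 ∈ pvKeys ∧ p.2 ∈ pvVals) →
    ∀ x, (∀ w, pvImmune w → w <+: x → w <+: r) →
      pvFoldP ps (c :: x) = c :: pvFoldP ps x := by
  intro ps
  induction ps with
  | nil => intro _ x _; rfl
  | cons p ps ih =>
    intro hps x hx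
    have hp1 := (hps p (by simp)).1
    have hp2 := (hps p (by simp)).2
    have hnomatch : ¬ p.1.isPrefixOf (c :: x) = true := by
      intro hm
      have hm' := List.isPrefixOf_iff_prefix.mp hm
      have hl := pv_F_len p.1 hp1
      obtain ⟨k0, ktl, hk⟩ : ∃ k0 ktl, p.1 = k0 :: ktl := by
        cases hkk : p.1 with
        | nil => rw [hkk] at hl; simp at hl
        | cons a b => exact ⟨a, b, rfl⟩
      rw [hk, List.cons_prefix_cons] at hm'
      obtain ⟨rfl, htl⟩ := hm'
      have himm : pvImmune ktl := ⟨p.1, hp1, 1, le_refl 1, by omega, by rw [hk]; rfl⟩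
      have := hx ktl himm htl
      exact hr p.1 hp1 (by rw [hk]; exact List.cons_prefix_cons.mpr ⟨rfl, this⟩)
    show pvFoldP ps (pvRepl p.1 p.2 (c :: x)) = c :: pvFoldP ps (pvRepl p.1 p.2 x)
    rw [show pvRepl p.1 p.2 (c :: x) = c :: pvRepl p.1 p.2 x from by
      rw [pvRepl, if_neg hnomatch]]
    exact ih (fun q hq => hps q (by simp [hq])) (pvRepl p.1 p.2 x)
      (fun w hi hw => hx w hi (pv_pp_immune p.1 p.2 hp2 x w hi hw))

theorem pv_fold_key_pre (K v u : List Char) (hK : (K, v) ∈ pvPairsB)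
    (hPre : ¬ ("mixtrallama".toList <:+: K ++ u)) :
    ∀ ps, (∀ p ∈ ps, p.1 ∈ pvKeys ∧ p.2 ∈ pvVals ∧ p.1 ≠ K) →
    ∀ x, (∀ w, pvImmune w → w <+: x → w <+: u) →
      pvFoldP ps (K ++ x) = K ++ pvFoldP ps x := by
  have hKmem : K ∈ pvKeys := List.mem_map.mpr ⟨(K, v), hK, rfl⟩
  intro ps
  induction ps with
  | nil => intro _ x _; rfl
  | cons p ps ih =>
    intro hps x hx
    obtain ⟨hp1, hp2, hpne⟩ := hps p (by simp)
    have hnom : ∀ q < K.length, ¬ p.1 <+: (K.drop q ++ x) := by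
      intro q hq hcon
      rcases Nat.eq_zero_or_pos q with rfl | hqpos
      · rw [List.drop_zero] at hcon
        rcases pv_prefix_append_cases hcon with h1 | ⟨h2, _⟩
        · exact absurd (List.isPrefixOf_iff_prefix.mpr h1)
            (by simp [pv_F_noprefix p.1 hp1 K hKmem hpne])
        · by_cases he : K = p.1
          · exact hpne he.symm
          · exact absurd (List.isPrefixOf_iff_prefix.mpr h2)
              (by simp [pv_F_noprefix K hKmem p.1 hp1 he])
      · rcases pv_prefix_append_cases hcon with h1 | ⟨h2, h3⟩
        · obtain ⟨hKm, hom, hq6⟩ := pv_F_OV K hKmem p.1 hp1 q (List.mem_range.mpr hq)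
            hqpos (by simp [List.isPrefixOf_iff_prefix.mpr h1])
          rw [hKm, hom, hq6] at h1
          have := h1.length_le
          simp at this
        · obtain ⟨hKm, hom, hq6⟩ := pv_F_OV K hKmem p.1 hp1 q (List.mem_range.mpr hq)
            hqpos (by simp [List.isPrefixOf_iff_prefix.mpr h2])
          have e1 : p.1.drop (K.drop q).length = "lama".toList := by
            rw [hKm, hom, hq6]; decide
          have h3' : "lama".toList <+: x := e1 ▸ h3
          have himm : pvImmune "lama".toList :=
            ⟨"llama".toList, by decide, 1, by decide, by decide, by decide⟩
          obtain ⟨tail, htail⟩ := hx _ himm h3'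
          apply hPre
          apply List.IsPrefix.isInfix
          refine ⟨tail, ?_⟩
          rw [hKm, ← htail]
          rw [show "mixtrallama".toList = "mixtral".toList ++ "lama".toList from by decide]
          rw [List.append_assoc]
    show pvFoldP ps (pvRepl p.1 p.2 (K ++ x)) = K ++ pvFoldP ps (pvRepl p.1 p.2 x)
    rw [pv_repl_append p.1 p.2 K x hnom]
    exact ih (fun q hq => hps q (by simp [hq])) _
      (fun w hi hw => hx w hi (pv_pp_immune p.1 p.2 hp2 x w hi hw))

theorem pv_fold_val (v : List Char) (hv : v ∈ pvVals) :
    ∀ ps, (∀ p ∈ ps, p.1 ∈ pvKeys) →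
    ∀ y, pvFoldP ps (v ++ y) = v ++ pvFoldP ps y := by
  intro ps
  induction ps with
  | nil => intro _ y; rfl
  | cons p ps ih =>
    intro hps y
    have hp1 := hps p (by simp)
    have hnom : ∀ q < v.length, ¬ p.1 <+: (v.drop q ++ y) := by
      intro q hq hcon
      rcases pv_prefix_append_cases hcon with h1 | ⟨h2, _⟩
      · exact absurd (List.isPrefixOf_iff_prefix.mpr h1)
          (by simp [(pv_F_val p.1 hp1 v hv q (List.mem_range.mpr hq)).2])
      · exact absurd (List.isPrefixOf_iff_prefix.mpr h2)
          (by simp [(pv_F_val p.1 hp1 v hv q (List.mem_range.mpr hq)).1])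
    show pvFoldP ps (pvRepl p.1 p.2 (v ++ y)) = v ++ pvFoldP ps (pvRepl p.1 p.2 y)
    rw [pv_repl_append p.1 p.2 v y hnom]
    exact ih (fun q hq => hps q (by simp [hq])) (pvRepl p.1 p.2 y)

theorem pv_repl_self (o n z : List Char) (ho : o ≠ []) :
    pvRepl o n (o ++ z) = n ++ pvRepl o n z := by
  obtain ⟨o0, os, rfl⟩ : ∃ o0 os, o = o0 :: os := by
    cases o with
    | nil => exact absurd rfl ho
    | cons a b => exact ⟨a, b, rfl⟩
  rw [List.cons_append, pvRepl,
    if_pos (List.isPrefixOf_iff_prefix.mpr ⟨z, by simp⟩)]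
  simp

theorem pv_fold_decomp (K vv u : List Char) (pre post : List (List Char × List Char))
    (hsplit : pvPasses = pre ++ (K, vv) :: post)
    (hpre : ∀ p ∈ pre, p.1 ∈ pvKeys ∧ p.2 ∈ pvVals ∧ p.1 ≠ K)
    (hpost : ∀ p ∈ post, p.1 ∈ pvKeys)
    (hK : (K, vv) ∈ pvPairsB) (hvv : vv ∈ pvVals) (hKne : K ≠ [])
    (hPre : ¬ ("mixtrallama".toList <:+: K ++ u)) :
    pvFoldP pvPasses (K ++ u) = vv ++ pvFoldP pvPasses u := by
  have h1 : pvFoldP pre (K ++ u) = K ++ pvFoldP pre u :=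
    pv_fold_key_pre K vv u hK hPre pre hpre u (fun _ _ h => h)
  rw [hsplit]
  show (pre ++ (K, vv) :: post).foldl (fun s p => pvRepl p.1 p.2 s) (K ++ u) = _
  rw [List.foldl_append, List.foldl_cons]
  have h1' : List.foldl (fun s p => pvRepl p.1 p.2 s) (K ++ u) pre = K ++ pvFoldP pre u := h1
  rw [h1', pv_repl_self K vv (pvFoldP pre u) hKne]
  have h3 := pv_fold_val vv hvv post hpost (pvRepl K vv (pvFoldP pre u))
  rw [show List.foldl (fun s p => pvRepl p.1 p.2 s) (vv ++ pvRepl K vv (pvFoldP pre u)) post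
      = pvFoldP post (vv ++ pvRepl K vv (pvFoldP pre u)) from rfl, h3]
  rw [show pvFoldP (pre ++ (K, vv) :: post) u
      = pvFoldP post (pvRepl K vv (pvFoldP pre u)) from by
    unfold pvFoldP; rw [List.foldl_append, List.foldl_cons]]

theorem pv_main : ∀ t : List Char, ¬ ("mixtrallama".toList <:+: t) →
    pvFoldP pvPasses t = pvScan t := by
  suffices H : ∀ n, ∀ t : List Char, t.length ≤ n → ¬ ("mixtrallama".toList <:+: t) →
      pvFoldP pvPasses t = pvScan t from fun t h => H t.length t le_rfl h
  intro n
  induction n with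
  | zero =>
    intro t ht _
    have hn : t = [] := by cases t with | nil => rfl | cons a b => simp at ht
    subst hn
    rw [pv_fold_nil, pvScan]
  | succ m ih =>
    intro t ht hPre
    cases t with
    | nil => rw [pv_fold_nil, pvScan]
    | cons c r =>
      cases hf : pvFind (c :: r) with
      | none =>
        have hr : ∀ K ∈ pvKeys, ¬ K <+: (c :: r) := by
          intro K hKm hKp
          obtain ⟨p, hmem, rfl⟩ := List.mem_map.mp hKm
          have hno := List.find?_eq_none.mp hf p hmem
          simp only [Bool.not_eq_true] at hno
          exact absurd (List.isPrefixOf_iff_prefix.mpr hKp) (by simp [hno])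
        have hps : ∀ p ∈ pvPasses, p.1 ∈ pvKeys ∧ p.2 ∈ pvVals := by decide
        rw [pv_fold_cons c r hr pvPasses hps r (fun _ _ hw => hw)]
        rw [ih r (by simp at ht; omega) (fun hinf => hPre (List.infix_cons hinf))]
        have hscan : pvScan (c :: r) = c :: pvScan r := by rw [pvScan, hf]
        rw [hscan]
      | some p =>
        have hf' : pvPairsB.find? (fun q => q.1.isPrefixOf (c :: r)) = some p := hf
        have hfind : p.1.isPrefixOf (c :: r) = true := by
          have := List.find?_some hf'
          simpa using this
        have hmem : p ∈ pvPairsB := List.mem_of_find?_eq_some hf'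
        have hpref : p.1 <+: (c :: r) := List.isPrefixOf_iff_prefix.mp hfind
        obtain ⟨u, hu⟩ := hpref
        have hK2 : 2 ≤ p.1.length := pv_F_len p.1 (List.mem_map.mpr ⟨p, hmem, rfl⟩)
        have hPre2 : ¬ ("mixtrallama".toList <:+: p.1 ++ u) := by rw [hu]; exact hPre
        have hFold : pvFoldP pvPasses (p.1 ++ u) = p.2 ++ pvFoldP pvPasses u := by
          have hmem' := hmem
          simp only [pvPairsB, List.mem_cons] at hmem'
          obtain ⟨K, vv⟩ := p
          simp only [Prod.mk.injEq] at hmem'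
          rcases hmem' with ⟨rfl,rfl⟩|⟨rfl,rfl⟩|⟨rfl,rfl⟩|⟨rfl,rfl⟩|⟨rfl,rfl⟩|⟨rfl,rfl⟩|⟨rfl,rfl⟩|⟨rfl,rfl⟩|⟨rfl,rfl⟩|⟨rfl,rfl⟩|⟨rfl,rfl⟩|hfalse
          · exact pv_fold_decomp "Google".toList "Core".toList u
              []
              [("google".toList, "Core".toList), ("Gemini".toList, "Brain".toList), ("gemini".toList, "Brain".toList), ("Groq".toList, "Neural Engine".toList), ("groq".toList, "Neural Engine".toList), ("llama".toList, "Model-X".toList), ("llama".toList, "Model-X".toList), ("mixtral".toList, "Model-Y".toList), ("mixtral".toList, "Model-Y".toList), ("openai".toList, "AI".toList), ("openai".toList, "AI".toList), ("ChatGPT".toList, "Assistant".toList), ("chatgpt".toList, "Assistant".toList)]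
              (by decide) (by decide) (by decide) (by decide) (by decide) (by decide) hPre2
          · exact pv_fold_decomp "google".toList "Core".toList u
              [("Google".toList, "Core".toList)]
              [("Gemini".toList, "Brain".toList), ("gemini".toList, "Brain".toList), ("Groq".toList, "Neural Engine".toList), ("groq".toList, "Neural Engine".toList), ("llama".toList, "Model-X".toList), ("llama".toList, "Model-X".toList), ("mixtral".toList, "Model-Y".toList), ("mixtral".toList, "Model-Y".toList), ("openai".toList, "AI".toList), ("openai".toList, "AI".toList), ("ChatGPT".toList, "Assistant".toList), ("chatgpt".toList, "Assistant".toList)]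
              (by decide) (by decide) (by decide) (by decide) (by decide) (by decide) hPre2
          · exact pv_fold_decomp "Gemini".toList "Brain".toList u
              [("Google".toList, "Core".toList), ("google".toList, "Core".toList)]
              [("gemini".toList, "Brain".toList), ("Groq".toList, "Neural Engine".toList), ("groq".toList, "Neural Engine".toList), ("llama".toList, "Model-X".toList), ("llama".toList, "Model-X".toList), ("mixtral".toList, "Model-Y".toList), ("mixtral".toList, "Model-Y".toList), ("openai".toList, "AI".toList), ("openai".toList, "AI".toList), ("ChatGPT".toList, "Assistant".toList), ("chatgpt".toList, "Assistant".toList)]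
              (by decide) (by decide) (by decide) (by decide) (by decide) (by decide) hPre2
          · exact pv_fold_decomp "gemini".toList "Brain".toList u
              [("Google".toList, "Core".toList), ("google".toList, "Core".toList), ("Gemini".toList, "Brain".toList)]
              [("Groq".toList, "Neural Engine".toList), ("groq".toList, "Neural Engine".toList), ("llama".toList, "Model-X".toList), ("llama".toList, "Model-X".toList), ("mixtral".toList, "Model-Y".toList), ("mixtral".toList, "Model-Y".toList), ("openai".toList, "AI".toList), ("openai".toList, "AI".toList), ("ChatGPT".toList, "Assistant".toList), ("chatgpt".toList, "Assistant".toList)]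
              (by decide) (by decide) (by decide) (by decide) (by decide) (by decide) hPre2
          · exact pv_fold_decomp "Groq".toList "Neural Engine".toList u
              [("Google".toList, "Core".toList), ("google".toList, "Core".toList), ("Gemini".toList, "Brain".toList), ("gemini".toList, "Brain".toList)]
              [("groq".toList, "Neural Engine".toList), ("llama".toList, "Model-X".toList), ("llama".toList, "Model-X".toList), ("mixtral".toList, "Model-Y".toList), ("mixtral".toList, "Model-Y".toList), ("openai".toList, "AI".toList), ("openai".toList, "AI".toList), ("ChatGPT".toList, "Assistant".toList), ("chatgpt".toList, "Assistant".toList)]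
              (by decide) (by decide) (by decide) (by decide) (by decide) (by decide) hPre2
          · exact pv_fold_decomp "groq".toList "Neural Engine".toList u
              [("Google".toList, "Core".toList), ("google".toList, "Core".toList), ("Gemini".toList, "Brain".toList), ("gemini".toList, "Brain".toList), ("Groq".toList, "Neural Engine".toList)]
              [("llama".toList, "Model-X".toList), ("llama".toList, "Model-X".toList), ("mixtral".toList, "Model-Y".toList), ("mixtral".toList, "Model-Y".toList), ("openai".toList, "AI".toList), ("openai".toList, "AI".toList), ("ChatGPT".toList, "Assistant".toList), ("chatgpt".toList, "Assistant".toList)]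
              (by decide) (by decide) (by decide) (by decide) (by decide) (by decide) hPre2
          · exact pv_fold_decomp "llama".toList "Model-X".toList u
              [("Google".toList, "Core".toList), ("google".toList, "Core".toList), ("Gemini".toList, "Brain".toList), ("gemini".toList, "Brain".toList), ("Groq".toList, "Neural Engine".toList), ("groq".toList, "Neural Engine".toList)]
              [("llama".toList, "Model-X".toList), ("mixtral".toList, "Model-Y".toList), ("mixtral".toList, "Model-Y".toList), ("openai".toList, "AI".toList), ("openai".toList, "AI".toList), ("ChatGPT".toList, "Assistant".toList), ("chatgpt".toList, "Assistant".toList)]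
              (by decide) (by decide) (by decide) (by decide) (by decide) (by decide) hPre2
          · exact pv_fold_decomp "mixtral".toList "Model-Y".toList u
              [("Google".toList, "Core".toList), ("google".toList, "Core".toList), ("Gemini".toList, "Brain".toList), ("gemini".toList, "Brain".toList), ("Groq".toList, "Neural Engine".toList), ("groq".toList, "Neural Engine".toList), ("llama".toList, "Model-X".toList), ("llama".toList, "Model-X".toList)]
              [("mixtral".toList, "Model-Y".toList), ("openai".toList, "AI".toList), ("openai".toList, "AI".toList), ("ChatGPT".toList, "Assistant".toList), ("chatgpt".toList, "Assistant".toList)]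
              (by decide) (by decide) (by decide) (by decide) (by decide) (by decide) hPre2
          · exact pv_fold_decomp "openai".toList "AI".toList u
              [("Google".toList, "Core".toList), ("google".toList, "Core".toList), ("Gemini".toList, "Brain".toList), ("gemini".toList, "Brain".toList), ("Groq".toList, "Neural Engine".toList), ("groq".toList, "Neural Engine".toList), ("llama".toList, "Model-X".toList), ("llama".toList, "Model-X".toList), ("mixtral".toList, "Model-Y".toList), ("mixtral".toList, "Model-Y".toList)]
              [("openai".toList, "AI".toList), ("ChatGPT".toList, "Assistant".toList), ("chatgpt".toList, "Assistant".toList)]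
              (by decide) (by decide) (by decide) (by decide) (by decide) (by decide) hPre2
          · exact pv_fold_decomp "ChatGPT".toList "Assistant".toList u
              [("Google".toList, "Core".toList), ("google".toList, "Core".toList), ("Gemini".toList, "Brain".toList), ("gemini".toList, "Brain".toList), ("Groq".toList, "Neural Engine".toList), ("groq".toList, "Neural Engine".toList), ("llama".toList, "Model-X".toList), ("llama".toList, "Model-X".toList), ("mixtral".toList, "Model-Y".toList), ("mixtral".toList, "Model-Y".toList), ("openai".toList, "AI".toList), ("openai".toList, "AI".toList)]
              [("chatgpt".toList, "Assistant".toList)]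
              (by decide) (by decide) (by decide) (by decide) (by decide) (by decide) hPre2
          · exact pv_fold_decomp "chatgpt".toList "Assistant".toList u
              [("Google".toList, "Core".toList), ("google".toList, "Core".toList), ("Gemini".toList, "Brain".toList), ("gemini".toList, "Brain".toList), ("Groq".toList, "Neural Engine".toList), ("groq".toList, "Neural Engine".toList), ("llama".toList, "Model-X".toList), ("llama".toList, "Model-X".toList), ("mixtral".toList, "Model-Y".toList), ("mixtral".toList, "Model-Y".toList), ("openai".toList, "AI".toList), ("openai".toList, "AI".toList), ("ChatGPT".toList, "Assistant".toList)]
              []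
              (by decide) (by decide) (by decide) (by decide) (by decide) (by decide) hPre2
          · simp at hfalse
        have hulen : u.length ≤ m := by
          have : p.1.length + u.length = r.length + 1 := by
            rw [← List.length_append, hu]; rfl
          simp only [List.length_cons] at ht
          omega
        have ihu : pvFoldP pvPasses u = pvScan u := by
          refine ih u hulen (fun hinf => hPre (hinf.trans ?_))
          exact List.IsSuffix.isInfix ⟨p.1, hu⟩
        obtain ⟨k0, ks, hk⟩ : ∃ k0 ks, p.1 = k0 :: ks := by
          cases hkk : p.1 with
          | nil => rw [hkk] at hK2; simp at hK2
          | cons a b => exact ⟨a, b, rfl⟩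
        have hscan : pvScan (c :: r) = p.2 ++ pvScan (List.drop (p.1.length - 1) r) := by
          rw [pvScan, hf]
        have hru : r = ks ++ u := by
          rw [hk, List.cons_append] at hu
          exact (List.cons.injEq _ _ _ _ ▸ hu |> And.right).symm

        have hdrop : List.drop (p.1.length - 1) r = u := by
          rw [hk, hru]
          simp
        calc pvFoldP pvPasses (c :: r) = pvFoldP pvPasses (p.1 ++ u) := by rw [hu]
          _ = p.2 ++ pvScan u := by rw [hFold, ihu]
          _ = pvScan (c :: r) := by rw [hscan, hdrop]

theorem pv_portA_toList (text : String) :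
    (sanitize_response text).toList = pvFoldP pvPasses text.toList := by
  have hlow0 : (PySem.Str.lower "Google").toList = "google".toList := by
    simp [PySem.Str.lower]; decide
  have hlow1 : (PySem.Str.lower "Gemini").toList = "gemini".toList := by
    simp [PySem.Str.lower]; decide
  have hlow2 : (PySem.Str.lower "Groq").toList = "groq".toList := by
    simp [PySem.Str.lower]; decide
  have hlow3 : (PySem.Str.lower "llama").toList = "llama".toList := by
    simp [PySem.Str.lower]; decide
  have hlow4 : (PySem.Str.lower "mixtral").toList = "mixtral".toList := by
    simp [PySem.Str.lower]; decide
  have hlow5 : (PySem.Str.lower "openai").toList = "openai".toList := by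
    simp [PySem.Str.lower]; decide
  have hlow6 : (PySem.Str.lower "ChatGPT").toList = "chatgpt".toList := by
    simp [PySem.Str.lower]; decide
  simp only [sanitize_response, List.foldl, pvFoldP, pvPasses, PySem.Str.toList_replace,
    hlow0, hlow1, hlow2, hlow3, hlow4, hlow5, hlow6]
  rw [pv_replace_eq _ _ _ (by decide), pv_replace_eq _ _ _ (by decide),
    pv_replace_eq _ _ _ (by decide), pv_replace_eq _ _ _ (by decide),
    pv_replace_eq _ _ _ (by decide), pv_replace_eq _ _ _ (by decide),
    pv_replace_eq _ _ _ (by decide), pv_replace_eq _ _ _ (by decide),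
    pv_replace_eq _ _ _ (by decide), pv_replace_eq _ _ _ (by decide),
    pv_replace_eq _ _ _ (by decide), pv_replace_eq _ _ _ (by decide),
    pv_replace_eq _ _ _ (by decide), pv_replace_eq _ _ _ (by decide)]

-- ===== VERDICT (by name: the statement is the Claim_ definition above) =====
theorem sanitize_response_spec : Claim_equal_sanitize_response := by
  intro text _ hPre
  unfold Spec_sanitize_response sanitize_response_alt
  unfold Pre_sanitize_response at hPre
  have hPre' : ¬ ("mixtrallama".toList <:+: text.toList) := by
    rw [PySem.Str.isIn_eq, PySem.Chars.isIn_eq_false_iff] at hPre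
    exact hPre
  calc sanitize_response text = String.ofList (sanitize_response text).toList := by simp
    _ = String.ofList (pvFoldP pvPasses text.toList) := by rw [pv_portA_toList]
    _ = String.ofList (pvScan text.toList) := by rw [pv_main text.toList hPre']
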